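-- pv_equiv track=rewrite | github.com/qualitycs/Yandex-Academy | l15_listAndStringMethods/p2_homework/t11_pyramidFromCubes.py | build_pyramid
-- ===== SOURCE A (Python) =====
-- def build_pyramid(cube):
--     """Построение пирамиды
--     максимальной высоты из
--     элементов массива cubes,
--     элементы берутся только
--     справа или слева."""
--     tower = [max(cube)]
--     n = len(cube)
--     for j in range(n):
--         left_elem = cube[0]
--         right_elem = cube[-1]
--         if left_elem > right_elem:
--             greed_choice = left_elem
--             cube.pop(0)
--         else:
--             greed_choice = right_elem
--             cube.pop()
--         if greed_choice > tower[-1]: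
--             return None
--         else:
--             tower.append(greed_choice)
--     return tower[1:]
-- ===== SOURCE B (Python) =====
-- def build_pyramid(cube):
--     """Two-pointer scan inward instead of popping from either end.
--     Does not mutate cube; return value is identical."""
--     i, j = 0, len(cube) - 1
--     prev = max(cube)
--     tower = []
--     while i <= j:
--         if cube[i] > cube[j]:
--             choice = cube[i]
--             i += 1
--         else:
--             choice = cube[j]
--             j -= 1
--         if choice > prev:
--             return None
--         tower.append(choice)
--         prev = choice
--     return tower
-- ===== Notes on version B (the rewrite author's own statement) =====
-- stated objective: alternative
-- what changed: Replaces the destructive loop that pops elements from the front/back of the list with a two-pointer scan inward over the unmutated list, tracking the previous choice in a variable instead of tower[-1].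
import Mathlib
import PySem

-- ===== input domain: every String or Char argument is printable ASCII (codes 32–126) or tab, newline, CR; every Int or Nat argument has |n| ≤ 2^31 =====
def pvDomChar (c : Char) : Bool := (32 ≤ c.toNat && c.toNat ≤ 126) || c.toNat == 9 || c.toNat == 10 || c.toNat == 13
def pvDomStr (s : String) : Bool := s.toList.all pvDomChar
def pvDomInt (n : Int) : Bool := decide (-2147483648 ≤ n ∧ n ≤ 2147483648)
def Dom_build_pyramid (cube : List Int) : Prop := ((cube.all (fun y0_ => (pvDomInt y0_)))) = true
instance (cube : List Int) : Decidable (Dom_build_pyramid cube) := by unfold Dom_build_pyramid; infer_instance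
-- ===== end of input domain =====

-- B replaces A's destructive pop(0)/pop() loop by a two-pointer inward scan over the unmutated list.
-- A empties the caller's list in place; B does not mutate it. Equivalence is about the RETURN value only.

-- ===== PORT A =====
-- for j in range(n): read both ends of the current (shrinking) list, pop the larger side,
-- return None if it exceeds tower[-1], else append it.  pop(0) = tail, pop() = dropLast (exact: l nonempty whenever reached).
def buildApyramidLoop : Nat → List Int → List Int → Option (List Int)
  | 0, _, tower => some (PySem.List.slice tower (some 1) none)   -- tower[1:]
  | Nat.succ k, l, tower =>
    match PySem.List.pyGet? l 0, PySem.List.pyGet? l (-1) with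
    | some left_elem, some right_elem =>
      let p := if left_elem > right_elem then (left_elem, l.tail) else (right_elem, l.dropLast)
      match PySem.List.pyGet? tower (-1) with
      | some last => if p.1 > last then none else buildApyramidLoop k p.2 (tower ++ [p.1])
      | none => none     -- unreachable: tower is never empty
    | _, _ => none       -- unreachable: l is nonempty whenever the loop body runs

def build_pyramid (cube : List Int) : Option (List Int) :=
  match PySem.List.max? cube (fun y => y) with      -- max(cube); raises on [] (excluded by Pre_)
  | none => none
  | some m => buildApyramidLoop cube.length cube [m]

-- ===== PORT B =====
def buildBpyramidLoop (cube : List Int) (i j prev : Int) (tower : List Int) : Option (List Int) :=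
  if _h : i ≤ j then
    match PySem.List.pyGet? cube i, PySem.List.pyGet? cube j with
    | some li, some rj =>
      if li > rj then
        if li > prev then none else buildBpyramidLoop cube (i + 1) j li (tower ++ [li])
      else
        if rj > prev then none else buildBpyramidLoop cube i (j - 1) rj (tower ++ [rj])
    | _, _ => none       -- unreachable in B's calls: 0 ≤ i ≤ j < len
  else some tower
termination_by (j + 1 - i).toNat
decreasing_by all_goals omega

def build_pyramid_alt (cube : List Int) : Option (List Int) :=
  match PySem.List.max? cube (fun y => y) with      -- max(cube); raises on [] (excluded by Pre_)
  | none => none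
  | some m => buildBpyramidLoop cube 0 ((cube.length : Int) - 1) m []

-- ===== PRECONDITION & SPEC =====
-- Pre_ excludes only the empty list, on which Python's max([]) raises ValueError in both A and B.
def Pre_build_pyramid (cube : List Int) : Prop := cube ≠ []
instance (cube : List Int) : Decidable (Pre_build_pyramid cube) := by unfold Pre_build_pyramid; infer_instance
def pvWitness_build_pyramid : List Int := [2, 5, 3]
def Spec_build_pyramid (cube : List Int) (out : Option (List Int)) : Prop := out = build_pyramid_alt cube
instance (cube : List Int) (out : Option (List Int)) : Decidable (Spec_build_pyramid cube out) := by unfold Spec_build_pyramid; infer_instance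

-- ===== CLAIM (what is proved, stated in full; the proofs are below) =====
def Claim_equal_build_pyramid : Prop := ∀ (cube : List Int), Dom_build_pyramid cube → Pre_build_pyramid cube → Spec_build_pyramid cube (build_pyramid cube)

-- ===== LEMMAS AND PROOFS =====

-- Invariant: after consuming the outer elements, A's shrinking list is the segment cube[a : a+m],
-- A's tower is x :: acc with last element prev, and B is at pointers i = a, j = a+m-1 with the same prev and acc.
theorem pyramid_bridge (cube : List Int) :
    ∀ (m a : Nat) (x prev : Int) (acc : List Int),
      a + m ≤ cube.length → (x :: acc).getLast? = some prev →
      buildApyramidLoop m ((cube.drop a).take m) (x :: acc)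
        = buildBpyramidLoop cube (a : Int) ((a : Int) + (m : Int) - 1) prev acc := by
  intro m
  induction m with
  | zero =>
    intro a x prev acc _ _
    rw [buildBpyramidLoop]
    simp [buildApyramidLoop, PySem.List.slice_from_one]
  | succ m ih =>
    intro a x prev acc hlen hlast
    have hl : ((cube.drop a).take (m + 1)).length = m + 1 := by
      simp; omega
    rw [buildBpyramidLoop,
      show (a : Int) + ((m + 1 : Nat) : Int) - 1 = ((a + m : Nat) : Int) from by push_cast; ring]
    have hib : (a : Int) ≤ ((a + m : Nat) : Int) := by push_cast; omega
    have hga : PySem.List.pyGet? cube (a : Int) = some cube[a] := by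
      rw [PySem.List.pyGet?_natCast]; exact List.getElem?_eq_getElem (by omega)
    have hgj : PySem.List.pyGet? cube ((a + m : Nat) : Int) = some cube[a + m] := by
      rw [PySem.List.pyGet?_natCast]; exact List.getElem?_eq_getElem (by omega)
    have h0 : PySem.List.pyGet? ((cube.drop a).take (m + 1)) 0 = some cube[a] := by
      rw [PySem.List.pyGet?_zero]
      simp [List.getElem?_drop]
    have hneg : PySem.List.pyGet? ((cube.drop a).take (m + 1)) (-1) = some cube[a + m] := by
      rw [PySem.List.pyGet?_neg_one, List.getLast?_eq_getElem?, hl]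
      simp [List.getElem?_drop]
    have htail : ((cube.drop a).take (m + 1)).tail = (cube.drop (a + 1)).take m := by
      rw [← List.drop_one, List.drop_take, List.drop_drop]
      norm_num [Nat.add_comm]
    have hdl : ((cube.drop a).take (m + 1)).dropLast = (cube.drop a).take m := by
      rw [List.dropLast_eq_take, hl]
      simp [List.take_take]
    simp only [buildApyramidLoop, h0, hneg, hga, hgj, dif_pos hib,
      PySem.List.pyGet?_neg_one, hlast]
    by_cases hc : cube[a] > cube[a + m]
    · simp only [if_pos hc, htail]
      split_ifs with h
      · rfl
      · rw [show (a : Int) + 1 = ((a + 1 : Nat) : Int) from by push_cast; ring,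
            show ((a + m : Nat) : Int) = ((a + 1 : Nat) : Int) + (m : Int) - 1 from by push_cast; ring]
        exact ih (a + 1) x cube[a] (acc ++ [cube[a]]) (by omega)
          (by rw [← List.cons_append, List.getLast?_concat])
    · simp only [if_neg hc, hdl]
      split_ifs with h
      · rfl
      · rw [show ((a + m : Nat) : Int) - 1 = (a : Int) + (m : Int) - 1 from by push_cast; ring]
        exact ih a x cube[a + m] (acc ++ [cube[a + m]]) (by omega)
          (by rw [← List.cons_append, List.getLast?_concat])

-- ===== VERDICT (by name: the statement is the Claim_ definition above) =====
theorem build_pyramid_spec : Claim_equal_build_pyramid := by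
  intro cube _ hpre
  unfold Spec_build_pyramid build_pyramid build_pyramid_alt
  cases hmx : PySem.List.max? cube (fun y => y) with
  | none => rfl
  | some m =>
    have h := pyramid_bridge cube cube.length 0 m m [] (by omega) (by simp)
    simp only [List.drop_zero, List.take_length] at h
    norm_num at h
    exact h
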